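-- pv_equiv track=rewrite | github.com/pheineke/botv3 | modules/main/!data.py | compare_tuples_except_index
-- ===== SOURCE A (Python) =====
-- def compare_tuples_except_index(tuple1, tuple2, index_to_ignore):
--     if not(tuple1):
--         return False
--     elif len(tuple1) != len(tuple2):
--         return False
--
--     for i in range(len(tuple1)):
--         if i != index_to_ignore and tuple1[i] != tuple2[i]:
--             return False
--     return True
-- ===== SOURCE B (Python) =====
-- def compare_tuples_except_index(tuple1, tuple2, index_to_ignore):
--     if not tuple1:
--         return False
--     if len(tuple1) != len(tuple2):
--         return False
--     idx = index_to_ignore if 0 <= index_to_ignore < len(tuple1) else len(tuple1)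
--     return tuple1[:idx] == tuple2[:idx] and tuple1[idx + 1:] == tuple2[idx + 1:]
-- ===== Notes on version B (the rewrite author's own statement) =====
-- stated objective: simpler
-- what changed: Replaces the element-by-element index loop with two built-in slice comparisons around the (clamped) ignored position.
import Mathlib
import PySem

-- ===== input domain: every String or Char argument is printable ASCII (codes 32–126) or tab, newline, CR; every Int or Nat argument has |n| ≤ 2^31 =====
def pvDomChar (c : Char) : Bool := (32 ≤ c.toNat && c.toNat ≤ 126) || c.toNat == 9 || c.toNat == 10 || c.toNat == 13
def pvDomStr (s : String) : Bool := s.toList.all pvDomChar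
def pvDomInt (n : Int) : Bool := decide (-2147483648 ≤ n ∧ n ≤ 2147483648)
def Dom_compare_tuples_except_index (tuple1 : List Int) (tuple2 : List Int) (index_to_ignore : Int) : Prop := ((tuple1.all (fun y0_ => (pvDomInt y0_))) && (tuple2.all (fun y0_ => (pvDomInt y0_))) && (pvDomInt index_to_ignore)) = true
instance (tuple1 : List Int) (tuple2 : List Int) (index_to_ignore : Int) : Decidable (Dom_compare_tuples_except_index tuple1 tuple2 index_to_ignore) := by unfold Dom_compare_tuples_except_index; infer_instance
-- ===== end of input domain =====

-- B replaces A's element-by-element index loop with two slice comparisons around the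
-- (clamped) ignored position; objective: simpler.

-- ===== PORT A =====
def compare_tuples_except_index (tuple1 : List Int) (tuple2 : List Int) (index_to_ignore : Int) : Bool :=
  if tuple1.isEmpty then false
  else if tuple1.length ≠ tuple2.length then false
  else
    -- for i in range(len(tuple1)): if i != index_to_ignore and tuple1[i] != tuple2[i]: return False
    (List.range tuple1.length).all (fun i =>
      !(decide ((i : Int) ≠ index_to_ignore) &&
        decide (PySem.List.pyGetD tuple1 (i : Int) 0 ≠ PySem.List.pyGetD tuple2 (i : Int) 0)))

-- ===== PORT B =====
def compare_tuples_except_index_alt (tuple1 : List Int) (tuple2 : List Int) (index_to_ignore : Int) : Bool :=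
  if tuple1.isEmpty then false
  else if tuple1.length ≠ tuple2.length then false
  else
    let idx : Int :=
      if 0 ≤ index_to_ignore ∧ index_to_ignore < tuple1.length then index_to_ignore
      else tuple1.length
    decide (PySem.List.slice tuple1 none (some idx) = PySem.List.slice tuple2 none (some idx)) &&
    decide (PySem.List.slice tuple1 (some (idx + 1)) none = PySem.List.slice tuple2 (some (idx + 1)) none)

-- ===== PRECONDITION & SPEC =====
def Spec_compare_tuples_except_index (tuple1 : List Int) (tuple2 : List Int) (index_to_ignore : Int) (out : Bool) : Prop := out = compare_tuples_except_index_alt tuple1 tuple2 index_to_ignore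
instance (tuple1 : List Int) (tuple2 : List Int) (index_to_ignore : Int) (out : Bool) : Decidable (Spec_compare_tuples_except_index tuple1 tuple2 index_to_ignore out) := by unfold Spec_compare_tuples_except_index; infer_instance

-- ===== CLAIM (what is proved, stated in full; the proofs are below) =====
def Claim_equal_compare_tuples_except_index : Prop := ∀ (tuple1 : List Int) (tuple2 : List Int) (index_to_ignore : Int), Dom_compare_tuples_except_index tuple1 tuple2 index_to_ignore → Spec_compare_tuples_except_index tuple1 tuple2 index_to_ignore (compare_tuples_except_index tuple1 tuple2 index_to_ignore)

-- ===== LEMMAS AND PROOFS =====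

-- Equality of the two slices around index j ↔ pointwise equality away from j.
lemma pv_slice_eq_iff (t1 t2 : List Int) (j : Nat) (h : t1.length = t2.length) :
    (t1.take j = t2.take j ∧ t1.drop (j+1) = t2.drop (j+1)) ↔
    ∀ i : Nat, i ≠ j → t1[i]? = t2[i]? := by
  constructor
  · rintro ⟨h1, h2⟩ i hij
    rcases Nat.lt_or_ge i j with hlt | hge
    · have := congrArg (fun l => l[i]?) h1
      simpa [List.getElem?_take, hlt] using this
    · have hgt : j < i := lt_of_le_of_ne hge (Ne.symm hij)
      obtain ⟨k, rfl⟩ : ∃ k, i = (j+1) + k := ⟨i - (j+1), by omega⟩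
      have := congrArg (fun l => l[k]?) h2
      simpa [List.getElem?_drop] using this
  · intro hall
    refine ⟨List.ext_getElem? fun i => ?_, List.ext_getElem? fun i => ?_⟩
    · by_cases hij : i < j
      · simp [hij, hall i (by omega)]
      · simp [hij]
    · simp [List.getElem?_drop, hall (j+1+i) (by omega)]

lemma pv_getD_eq_iff (t1 t2 : List Int) (h : t1.length = t2.length) (j : Nat) :
    (∀ i : Nat, i ≠ j → t1[i]? = t2[i]?) ↔
    (∀ i : Nat, i < t1.length → i ≠ j → t1.getD i 0 = t2.getD i 0) := by
  constructor
  · intro hall i hi hij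
    have := hall i hij
    simp [List.getD_eq_getElem?_getD, this]
  · intro hall i hij
    by_cases hi : i < t1.length
    · have := hall i hi hij
      rw [List.getElem?_eq_getElem hi, List.getElem?_eq_getElem (by omega)]
      simpa [List.getD_eq_getElem?_getD, List.getElem?_eq_getElem, hi,
        show i < t2.length by omega] using this
    · rw [List.getElem?_eq_none (by omega), List.getElem?_eq_none (by omega)]

-- ===== VERDICT (by name: the statement is the Claim_ definition above) =====
theorem compare_tuples_except_index_spec : Claim_equal_compare_tuples_except_index := by
  intro t1 t2 k _
  unfold Spec_compare_tuples_except_index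
  unfold compare_tuples_except_index compare_tuples_except_index_alt
  by_cases hemp : t1.isEmpty
  · simp [hemp]
  by_cases hlen : t1.length ≠ t2.length
  · simp [hemp, hlen]
  push_neg at hlen
  rw [if_neg (by simpa using hemp), if_neg (by simp [hlen]),
      if_neg (by simpa using hemp), if_neg (by simp [hlen])]
  by_cases hk : 0 ≤ k ∧ k < (t1.length : Int)
  · -- ignored index in range: j = k.toNat
    obtain ⟨hk0, hkn⟩ := hk
    rw [if_pos (⟨hk0, hkn⟩ : 0 ≤ k ∧ k < (t1.length : Int))]
    rw [Bool.eq_iff_iff]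
    simp only [List.all_eq_true, List.mem_range, Bool.and_eq_true, decide_eq_true_eq,
      Bool.not_eq_eq_eq_not, Bool.not_true, Bool.and_eq_false_iff, decide_eq_false_iff_not,
      not_not, PySem.List.pyGetD_natCast]
    rw [PySem.List.slice_to _ hk0, PySem.List.slice_to _ hk0,
        PySem.List.slice_from _ (by omega), PySem.List.slice_from _ (by omega),
        show (k + 1).toNat = k.toNat + 1 by omega]
    constructor
    · intro hall
      refine ((pv_slice_eq_iff t1 t2 k.toNat hlen).mpr ?_)
      rw [pv_getD_eq_iff t1 t2 hlen]
      intro i hi hij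
      rcases hall i hi with h | h
      · exfalso; apply hij; omega
      · exact h
    · intro hsl i hi
      have := (pv_getD_eq_iff t1 t2 hlen k.toNat).mp
        ((pv_slice_eq_iff t1 t2 k.toNat hlen).mp hsl)
      by_cases hij : (i : Int) = k
      · exact Or.inl hij
      · exact Or.inr (this i hi (by omega))
  · -- ignored index out of range: j = len, slices are whole list and []
    rw [if_neg hk]
    rw [Bool.eq_iff_iff]
    simp only [List.all_eq_true, List.mem_range, Bool.and_eq_true, decide_eq_true_eq,
      Bool.not_eq_eq_eq_not, Bool.not_true, Bool.and_eq_false_iff, decide_eq_false_iff_not,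
      not_not, PySem.List.pyGetD_natCast]
    rw [PySem.List.slice_to _ (by omega), PySem.List.slice_to _ (by omega),
        PySem.List.slice_from _ (by omega), PySem.List.slice_from _ (by omega),
        show ((t1.length : Int)).toNat = t1.length by omega,
        show ((t1.length : Int) + 1).toNat = t1.length + 1 by omega]
    have hkout : ∀ i : Nat, i < t1.length → (i : Int) ≠ k := by
      intro i hi hik
      apply hk
      constructor <;> omega
    constructor
    · intro hall
      refine (pv_slice_eq_iff t1 t2 t1.length hlen).mpr ?_
      rw [pv_getD_eq_iff t1 t2 hlen]
      intro i hi _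
      rcases hall i hi with h | h
      · exact absurd h (hkout i hi)
      · exact h
    · intro hsl i hi
      have := (pv_getD_eq_iff t1 t2 hlen t1.length).mp
        ((pv_slice_eq_iff t1 t2 t1.length hlen).mp hsl)
      exact Or.inr (this i hi (by omega))
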